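-- pv_equiv track=rewrite | github.com/d-shames3/GMB-Strength-Index | whatsapp_client.py | format_llamas
-- ===== SOURCE A (Python) =====
-- def format_llamas(llamas):
--     formatted_llamas = "The llamas are:\n"
--
--     if len(llamas) < 10:
--         raise Exception("invalid llamas format")
--
--     for i, llama in enumerate(llamas):
--         if i in [0, 1]:
--             position_keyword="over"
--         if i > 1 and i < 8:
--             continue
--         if i in [8, 9]:
--             position_keyword="under"
--
--         formatted_llamas += f"{llama[0]} is {position_keyword}performing by {llama[1]*-1} spots\n"
--
--     return formatted_llamas
-- ===== SOURCE B (Python) =====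
-- def format_llamas(llamas):
--     if len(llamas) < 10:
--         raise Exception("invalid llamas format")
--     over = [f"{name} is overperforming by {-spots} spots\n" for name, spots in llamas[:2]]
--     under = [f"{name} is underperforming by {-spots} spots\n" for name, spots in llamas[8:]]
--     return "The llamas are:\n" + "".join(over) + "".join(under)
-- ===== Notes on version B (the rewrite author's own statement) =====
-- stated objective: simpler
-- what changed: Replaced the single indexed loop with continue-skips and a carried keyword variable by two explicit slice passes (llamas[:2] over-lines, llamas[8:] under-lines) joined onto the header.
import Mathlib
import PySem

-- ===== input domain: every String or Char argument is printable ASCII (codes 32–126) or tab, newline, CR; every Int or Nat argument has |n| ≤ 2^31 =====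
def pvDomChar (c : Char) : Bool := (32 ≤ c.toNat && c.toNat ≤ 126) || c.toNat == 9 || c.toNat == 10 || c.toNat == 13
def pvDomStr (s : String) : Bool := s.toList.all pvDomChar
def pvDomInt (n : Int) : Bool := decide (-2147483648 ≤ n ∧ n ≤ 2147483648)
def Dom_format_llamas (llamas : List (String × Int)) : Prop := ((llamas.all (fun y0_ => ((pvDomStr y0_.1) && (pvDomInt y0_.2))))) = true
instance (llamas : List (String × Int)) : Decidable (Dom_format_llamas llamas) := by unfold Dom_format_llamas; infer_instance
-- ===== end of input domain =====

-- B replaces A's single indexed loop (continue-skips + carried keyword variable) by two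
-- explicit slice passes (llamas[:2] over-lines, llamas[8:] under-lines); same output, simpler.


-- ===== PORT A =====
-- the loop body: i counter, kw the carried 'position_keyword' (initially unset; with
-- Pre_ the list is nonempty so i = 0 sets it before its first use), acc the string so far
def pvGoA : Nat → String → String → List (String × Int) → String
  | _, _, acc, [] => acc
  | i, kw, acc, (name, sp) :: rest =>
    let kw1 := if i == 0 || i == 1 then "over" else kw
    if 1 < i ∧ i < 8 then
      pvGoA (i + 1) kw1 acc rest
    else
      let kw2 := if i == 8 || i == 9 then "under" else kw1
      pvGoA (i + 1) kw2
        (acc ++ name ++ " is " ++ kw2 ++ "performing by " ++ PySem.Int.toStr (sp * (-1)) ++ " spots\n")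
        rest

def format_llamas (llamas : List (String × Int)) : String :=
  if llamas.length < 10 then ""   -- Python raises Exception here; excluded by Pre_
  else pvGoA 0 "" "The llamas are:\n" llamas

-- ===== PORT B =====
def pvLine (kw : String) (p : String × Int) : String :=
  p.1 ++ " is " ++ kw ++ "performing by " ++ PySem.Int.toStr (-p.2) ++ " spots\n"

def format_llamas_alt (llamas : List (String × Int)) : String :=
  if llamas.length < 10 then ""   -- Python raises Exception here; excluded by Pre_
  else
    "The llamas are:\n"
      ++ String.join ((PySem.List.slice llamas none (some 2)).map (pvLine "over"))
      ++ String.join ((PySem.List.slice llamas (some 8) none).map (pvLine "under"))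

-- ===== PRECONDITION & SPEC =====
-- Pre_ excludes exactly the inputs (fewer than 10 llamas) on which A raises Exception.
def Pre_format_llamas (llamas : List (String × Int)) : Prop := 10 ≤ llamas.length
instance (llamas : List (String × Int)) : Decidable (Pre_format_llamas llamas) := by unfold Pre_format_llamas; infer_instance
def pvWitness_format_llamas : (List (String × Int)) :=
  [("a", 1), ("b", -2), ("c", 3), ("d", 4), ("e", 5), ("f", 6), ("g", 7), ("h", 8), ("i", 9), ("j", 0)]
def Spec_format_llamas (llamas : List (String × Int)) (out : String) : Prop := out = format_llamas_alt llamas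
instance (llamas : List (String × Int)) (out : String) : Decidable (Spec_format_llamas llamas out) := by unfold Spec_format_llamas; infer_instance

-- ===== CLAIM (what is proved, stated in full; the proofs are below) =====
def Claim_equal_format_llamas : Prop := ∀ (llamas : List (String × Int)), Dom_format_llamas llamas → Pre_format_llamas llamas → Spec_format_llamas llamas (format_llamas llamas)

-- ===== LEMMAS AND PROOFS =====
theorem pvFoldl_join (l : List String) :
    ∀ acc : String, List.foldl (fun r s => r ++ s) acc l = acc ++ String.join l := by
  induction l with
  | nil => intro acc; simp [String.join]
  | cons x l ih =>
    intro acc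
    rw [List.foldl_cons, ih,
      show String.join (x :: l) = List.foldl (fun r s => r ++ s) ("" ++ x) l from rfl,
      ih ("" ++ x)]
    simp [String.append_assoc]

theorem pvJoin_cons (x : String) (l : List String) :
    String.join (x :: l) = x ++ String.join l := by
  show List.foldl (fun r s => r ++ s) "" (x :: l) = x ++ String.join l
  simp [pvFoldl_join]

-- once the keyword is "under" and i ≥ 8, the loop just appends under-lines
theorem pvGoA_under (r : List (String × Int)) :
    ∀ (i : Nat) (acc : String), 8 ≤ i →
      pvGoA i "under" acc r = acc ++ String.join (r.map (pvLine "under")) := by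
  induction r with
  | nil => intro i acc _; simp [pvGoA, String.join]
  | cons p rest ih =>
    intro i acc hi
    obtain ⟨name, sp⟩ := p
    have h01 : (i == 0 || i == 1) = false := by
      simp only [Bool.or_eq_false_iff, beq_eq_false_iff_ne, ne_eq]; omega
    have hskip : ¬(1 < i ∧ i < 8) := by omega
    simp only [pvGoA, h01, Bool.false_eq_true, if_false, if_neg hskip, ite_self]
    rw [ih (i + 1) _ (by omega), List.map_cons, pvJoin_cons]
    simp [pvLine, String.append_assoc]

-- entering index 8 with any keyword appends exactly the under-lines of the remainder
theorem pvGoA_at8 (r : List (String × Int)) (kw acc : String) :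
    pvGoA 8 kw acc r = acc ++ String.join (r.map (pvLine "under")) := by
  cases r with
  | nil => simp [pvGoA, String.join]
  | cons p rest =>
    obtain ⟨name, sp⟩ := p
    simp only [pvGoA, show ((8 == 0 || 8 == 1) = false) from rfl,
      show ((8 == 8 || 8 == 9) = true) from rfl, Bool.false_eq_true, if_false,
      show ¬(1 < 8 ∧ (8:Nat) < 8) from by omega, if_true]
    rw [pvGoA_under rest 9 _ (by omega), List.map_cons, pvJoin_cons]
    simp [pvLine, String.append_assoc]

-- indices 2..7 are skipped: the loop drops 8 - i elements and resumes at index 8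
theorem pvGoA_skip (r : List (String × Int)) :
    ∀ (i : Nat) (kw acc : String), 1 < i → i < 8 →
      pvGoA i kw acc r = pvGoA 8 kw acc (r.drop (8 - i)) := by
  induction r with
  | nil => intro i kw acc _ _; simp [pvGoA]
  | cons p rest ih =>
    intro i kw acc h1 h2
    obtain ⟨name, sp⟩ := p
    have h01 : (i == 0 || i == 1) = false := by
      simp only [Bool.or_eq_false_iff, beq_eq_false_iff_ne, ne_eq]; omega
    simp only [pvGoA, h01, Bool.false_eq_true, if_false, if_pos (⟨h1, h2⟩ : 1 < i ∧ i < 8)]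
    by_cases h7 : i = 7
    · subst h7; simp [pvGoA_at8]
    · rw [ih (i + 1) kw acc (by omega) (by omega)]
      have h : (8 - i) = (8 - (i + 1)) + 1 := by omega
      rw [h]
      rfl

-- ===== VERDICT (by name: the statement is the Claim_ definition above) =====
theorem format_llamas_spec : Claim_equal_format_llamas := by
  intro llamas _ hpre
  unfold Spec_format_llamas format_llamas format_llamas_alt
  unfold Pre_format_llamas at hpre
  have hlen : ¬ llamas.length < 10 := by omega
  rw [if_neg hlen, if_neg hlen]
  obtain ⟨⟨na, sa⟩, ⟨nb, sb⟩, r2, rfl⟩ : ∃ a b r2, llamas = a :: b :: r2 := by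
    match llamas, hpre with
    | a :: b :: r2, _ => exact ⟨a, b, r2, rfl⟩
  simp only [pvGoA, show ((0 == 0 || 0 == 1) = true) from rfl,
    show ((1 == 0 || 1 == 1) = true) from rfl, if_true,
    show ((0 == 8 || 0 == 9) = false) from rfl, show ((1 == 8 || 1 == 9) = false) from rfl,
    Bool.false_eq_true, if_false,
    if_neg (show ¬(1 < 0 ∧ (0:Nat) < 8) from by omega),
    if_neg (show ¬(1 < 1 ∧ (1:Nat) < 8) from by omega)]
  rw [pvGoA_skip r2 (0 + 1 + 1) "over" _ (by omega) (by omega), pvGoA_at8]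
  rw [show PySem.List.slice ((na, sa) :: (nb, sb) :: r2) none (some 2) =
        ((na, sa) :: (nb, sb) :: r2).take 2 from PySem.List.slice_to_natCast _ 2,
      show PySem.List.slice ((na, sa) :: (nb, sb) :: r2) (some 8) none =
        ((na, sa) :: (nb, sb) :: r2).drop 8 from PySem.List.slice_from_natCast _ 8]
  simp [pvLine, pvJoin_cons, String.append_assoc, show String.join ([] : List String) = "" from rfl]
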